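-- pv_equiv track=rewrite | github.com/Dudzian/Dudzian | scripts/ui_marketplace_bridge.py | _normalize_portfolio_ids
-- ===== SOURCE A (Python) =====
-- from typing import Any, Mapping, Sequence
--
-- def _normalize_portfolio_ids(values: Any) -> list[str]:
--     if not isinstance(values, Sequence) or isinstance(values, (str, bytes)):
--         return []
--     normalized: list[str] = []
--     for value in values:
--         if isinstance(value, str):
--             text = value.strip()
--             if text and text not in normalized:
--                 normalized.append(text)
--     normalized.sort()
--     return normalized
-- ===== SOURCE B (Python) =====
-- from typing import Any, Mapping, Sequence
--
-- def _normalize_portfolio_ids(values: Any) -> list[str]: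
--     if not isinstance(values, Sequence) or isinstance(values, (str, bytes)):
--         return []
--     items = [t for t in (v.strip() for v in values if isinstance(v, str)) if t]
--     items.sort()
--     result: list[str] = []
--     for t in items:
--         if not result or result[-1] != t:
--             result.append(t)
--     return result
-- ===== Notes on version B (the rewrite author's own statement) =====
-- stated objective: faster
-- what changed: A dedups with an O(n) membership scan into the growing result before sorting; B collects all nonempty stripped strings, sorts first, then removes duplicates in one linear adjacent-uniq pass over the sorted list.
import Mathlib
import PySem

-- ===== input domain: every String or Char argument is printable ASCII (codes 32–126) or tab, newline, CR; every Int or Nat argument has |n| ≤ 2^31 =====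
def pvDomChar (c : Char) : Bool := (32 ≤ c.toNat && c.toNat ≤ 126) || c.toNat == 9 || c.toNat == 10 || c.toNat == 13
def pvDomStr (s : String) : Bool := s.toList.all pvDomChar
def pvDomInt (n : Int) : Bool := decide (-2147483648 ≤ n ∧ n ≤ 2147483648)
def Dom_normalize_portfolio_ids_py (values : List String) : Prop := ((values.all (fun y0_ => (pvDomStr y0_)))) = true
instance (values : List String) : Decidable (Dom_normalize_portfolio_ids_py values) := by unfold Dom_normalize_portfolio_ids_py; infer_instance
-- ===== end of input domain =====

-- B replaces A's membership-scan dedup-then-sort by sort-then-adjacent-uniq (one linear pass after the sort).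

-- ===== PORT A =====
-- loop body of A: append the stripped text if nonempty and not already collected
def pvStepA (acc : List String) (value : String) : List String :=
  let text := PySem.Str.strip value
  if text ≠ "" ∧ text ∉ acc then acc ++ [text] else acc

def normalize_portfolio_ids_py (values : List String) : List String :=
  let normalized := values.foldl pvStepA []
  PySem.List.sorted normalized (fun x => x) false

-- ===== PORT B =====
-- loop body of B: `if not result or result[-1] != t: result.append(t)`
def pvStepB (result : List String) (t : String) : List String :=
  if result = [] ∨ result.getLast? ≠ some t then result ++ [t] else result

def normalize_portfolio_ids_py_alt (values : List String) : List String :=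
  let items := (values.map PySem.Str.strip).filter (fun t => t ≠ "")
  let sortedItems := PySem.List.sorted items (fun x => x) false
  sortedItems.foldl pvStepB []

-- ===== PRECONDITION & SPEC =====
def Spec_normalize_portfolio_ids_py (values : List String) (out : List String) : Prop := out = normalize_portfolio_ids_py_alt values
instance (values : List String) (out : List String) : Decidable (Spec_normalize_portfolio_ids_py values out) := by unfold Spec_normalize_portfolio_ids_py; infer_instance

-- ===== CLAIM (what is proved, stated in full; the proofs are below) =====
def Claim_equal_normalize_portfolio_ids_py : Prop := ∀ (values : List String), Dom_normalize_portfolio_ids_py values → Spec_normalize_portfolio_ids_py values (normalize_portfolio_ids_py values)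

-- ===== LEMMAS AND PROOFS =====

-- A's dedup loop: the result is Nodup and its members are acc's plus the nonempty stripped strings.
theorem pvA_loop (vs : List String) : ∀ (acc : List String), acc.Nodup →
    (vs.foldl pvStepA acc).Nodup ∧
    (∀ x, x ∈ vs.foldl pvStepA acc ↔ x ∈ acc ∨ (x ∈ vs.map PySem.Str.strip ∧ x ≠ "")) := by
  induction vs with
  | nil => intro acc h; simpa using h
  | cons v vs ih =>
    intro acc hacc
    rw [List.foldl_cons]
    by_cases hc : PySem.Str.strip v ≠ "" ∧ PySem.Str.strip v ∉ acc
    · rw [show pvStepA acc v = acc ++ [PySem.Str.strip v] from by unfold pvStepA; rw [if_pos hc]]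
      have hnodup : (acc ++ [PySem.Str.strip v]).Nodup := by
        simp only [List.nodup_append, List.nodup_singleton, true_and]
        refine ⟨hacc, ?_⟩
        intro a ha b hb
        rw [List.mem_singleton] at hb; subst hb
        intro h; exact hc.2 (h ▸ ha)
      obtain ⟨h1, h2⟩ := ih (acc ++ [PySem.Str.strip v]) hnodup
      refine ⟨h1, fun x => ?_⟩
      rw [h2 x]
      simp only [List.mem_append, List.map_cons, List.mem_cons, List.not_mem_nil, or_false]
      constructor
      · rintro ((h | rfl) | ⟨h, hne⟩)
        · exact Or.inl h
        · exact Or.inr ⟨Or.inl rfl, hc.1⟩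
        · exact Or.inr ⟨Or.inr h, hne⟩
      · rintro (h | ⟨(rfl | h), hne⟩)
        · exact Or.inl (Or.inl h)
        · exact Or.inl (Or.inr rfl)
        · exact Or.inr ⟨h, hne⟩
    · rw [show pvStepA acc v = acc from by unfold pvStepA; rw [if_neg hc]]
      obtain ⟨h1, h2⟩ := ih acc hacc
      refine ⟨h1, fun x => ?_⟩
      rw [h2 x]
      simp only [List.map_cons, List.mem_cons]
      constructor
      · rintro (h | ⟨h, hne⟩)
        · exact Or.inl h
        · exact Or.inr ⟨Or.inr h, hne⟩
      · rintro (h | ⟨(rfl | h), hne⟩)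
        · exact Or.inl h
        · push_neg at hc
          exact Or.inl (hc hne)
        · exact Or.inr ⟨h, hne⟩

-- in a strictly increasing list every element is ≤ the last
theorem pvLast_max : ∀ (l : List String), l.Pairwise (· < ·) → ∀ (m : String), l.getLast? = some m →
    ∀ a ∈ l, a ≤ m := by
  intro l
  induction l with
  | nil => intro _ m hm; cases hm
  | cons x xs ih =>
    intro hl m hm a ha
    cases xs with
    | nil =>
      simp at ha hm; subst ha; subst hm; exact le_refl _
    | cons y ys =>
      have hm' : (y :: ys).getLast? = some m := by
        simpa [List.getLast?_cons_cons] using hm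
      have htail := (List.pairwise_cons.mp hl).2
      rcases List.mem_cons.mp ha with rfl | ha'
      · have hy : a < y := (List.pairwise_cons.mp hl).1 y List.mem_cons_self
        have hym : y ≤ m := ih htail m hm' y List.mem_cons_self
        exact le_of_lt (lt_of_lt_of_le hy hym)
      · exact ih htail m hm' a ha'

-- B's adjacent-uniq loop on a (≤)-sorted input: output strictly increasing, members = acc ∪ input.
theorem pvB_loop (s : List String) : ∀ (acc : List String),
    s.Pairwise (· ≤ ·) →
    acc.Pairwise (· < ·) →
    (∀ a ∈ acc, ∀ b ∈ s, a ≤ b) →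
    (s.foldl pvStepB acc).Pairwise (· < ·) ∧
    (∀ x, x ∈ s.foldl pvStepB acc ↔ x ∈ acc ∨ x ∈ s) := by
  induction s with
  | nil => intro acc _ hacc _; simpa using hacc
  | cons t s ih =>
    intro acc hs hacc hle
    have hs' := (List.pairwise_cons.mp hs).2
    have hts : ∀ b ∈ s, t ≤ b := (List.pairwise_cons.mp hs).1
    rw [List.foldl_cons]
    by_cases hc : acc = [] ∨ acc.getLast? ≠ some t
    · rw [show pvStepB acc t = acc ++ [t] from by unfold pvStepB; rw [if_pos hc]]
      have hlt : ∀ a ∈ acc, a < t := by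
        intro a ha
        rcases hc with rfl | hne
        · cases ha
        · obtain ⟨m, hm⟩ : ∃ m, acc.getLast? = some m := by
            cases h : acc.getLast? with
            | none => exact absurd (List.getLast?_eq_none_iff.mp h) (by rintro rfl; cases ha)
            | some m => exact ⟨m, rfl⟩
          have ham : a ≤ m := pvLast_max acc hacc m hm a ha
          have hmem : m ∈ acc := List.mem_of_getLast? hm
          have hmt : m ≤ t := hle m hmem t List.mem_cons_self
          have hmne : m ≠ t := by intro h; exact hne (h ▸ hm)
          exact lt_of_le_of_lt ham (lt_of_le_of_ne hmt hmne)
      have hacc' : (acc ++ [t]).Pairwise (· < ·) := by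
        refine List.pairwise_append.mpr ⟨hacc, List.pairwise_singleton _ _, ?_⟩
        intro a ha b hb
        rw [List.mem_singleton] at hb; subst hb
        exact hlt a ha
      have hle' : ∀ a ∈ acc ++ [t], ∀ b ∈ s, a ≤ b := by
        intro a ha b hb
        rcases List.mem_append.mp ha with h | h
        · exact hle a h b (List.mem_cons_of_mem _ hb)
        · rw [List.mem_singleton] at h; subst h; exact hts b hb
      obtain ⟨h1, h2⟩ := ih (acc ++ [t]) hs' hacc' hle'
      refine ⟨h1, fun x => ?_⟩
      rw [h2 x]
      simp only [List.mem_append, List.mem_cons, List.not_mem_nil, or_false]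
      tauto
    · rw [show pvStepB acc t = acc from by unfold pvStepB; rw [if_neg hc]]
      push_neg at hc
      have htacc : t ∈ acc := List.mem_of_getLast? hc.2
      have hle' : ∀ a ∈ acc, ∀ b ∈ s, a ≤ b := fun a ha b hb => hle a ha b (List.mem_cons_of_mem _ hb)
      obtain ⟨h1, h2⟩ := ih acc hs' hacc hle'
      refine ⟨h1, fun x => ?_⟩
      rw [h2 x]
      simp only [List.mem_cons]
      constructor
      · rintro (h | h)
        · exact Or.inl h
        · exact Or.inr (Or.inr h)
      · rintro (h | rfl | h)
        · exact Or.inl h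
        · exact Or.inl htacc
        · exact Or.inr h

-- ===== VERDICT (by name: the statement is the Claim_ definition above) =====
theorem normalize_portfolio_ids_py_spec : Claim_equal_normalize_portfolio_ids_py := by
  intro values _
  unfold Spec_normalize_portfolio_ids_py normalize_portfolio_ids_py normalize_portfolio_ids_py_alt
  set L := (values.map PySem.Str.strip).filter (fun t => t ≠ "") with hL
  set nA := values.foldl pvStepA [] with hnA
  set S := PySem.List.sorted L (fun x => x) false with hS
  obtain ⟨hAnodup, hAmem⟩ := pvA_loop values [] List.nodup_nil
  have hSpw : S.Pairwise (· ≤ ·) := PySem.List.sorted_pairwise (xs := L) (key := fun x => x)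
  obtain ⟨hBpw, hBmem⟩ := pvB_loop S [] hSpw List.Pairwise.nil (by simp)
  set r2 := S.foldl pvStepB [] with hr2
  have hmem : ∀ x, x ∈ r2 ↔ x ∈ nA := by
    intro x
    rw [hBmem x, hAmem x]
    simp [hS, PySem.List.mem_sorted, hL, List.mem_filter, and_comm]
  have hr2nodup : r2.Nodup := hBpw.imp ne_of_lt
  have hperm : r2.Perm nA := (List.perm_ext_iff_of_nodup hr2nodup hAnodup).mpr hmem
  show PySem.List.sorted nA (fun x => x) = r2
  exact PySem.List.sorted_eq_of_perm_of_pairwise_lt nA r2 (fun x => x) hperm hBpw
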